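-- pv_equiv track=rewrite | github.com/data-weaverss/algorithm | sol/baekjoon/09_가르침_timeout.py | solution
-- ===== SOURCE A (Python) =====
-- from itertools import combinations
--
-- def solution(teach_cnt, words):
--     """
--     teach_cnt: 가르칠 알파벳의 개수
--     words: anta ** tica 인 남극언어
--     """
--     teach_cnt -= 5
--     if teach_cnt < 0:
--         return 0
--
--     # O(NL)
--     answer = 0
--     necessary = set('antatica')
--     required_letters = set()
--     always_valid = 0
--     word_strip = []
--     for word in words:
--         filtered = set(word) - necessary
--         if not filtered:
--             always_valid += 1
--             continue
--         elif len(filtered) <= teach_cnt: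
--             required_letters.update(filtered)
--             word_strip.append(filtered)
--
--     if len(required_letters) <= teach_cnt:
--         return always_valid + len(word_strip)
--
--     # 21개 중 K-5개 선택, C(21, K-5) 최댓값: C(21, 11) = 352716
--     for chosen_words in combinations(required_letters, teach_cnt):
--         count = 0
--         # 21 + 5
--         learned = set(chosen_words) | necessary
--         for word in word_strip: # N: 50
--             # 7
--             for c in word:
--                 if c not in learned:
--                     break
--             else:
--                 count += 1
--
--         answer = max(answer, count)
--     # 352,716 × 50 × 7 = 123450600
--     return always_valid + answer
-- ===== SOURCE B (Python) =====
-- def solution(teach_cnt, words):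
--     k = teach_cnt - 5
--     if k < 0:
--         return 0
--     necessary = set('antatica')
--     always = 0
--     strip = []
--     letters = set()
--     for word in words:
--         extra = set(word) - necessary
--         if not extra:
--             always += 1
--         elif len(extra) <= k:
--             strip.append(extra)
--             letters.update(extra)
--
--     def best(letters, budget, strip):
--         # max #words from strip coverable by learning <= budget letters among `letters`
--         if not strip or not letters or budget == 0:
--             return 0
--         c, rest = letters[0], letters[1:]
--         # don't learn c: words containing c become impossible
--         skip = best(rest, budget, [w for w in strip if c not in w])
--         # learn c: words reduced to {c} are done, others shed c
--         gained = sum(1 for w in strip if w == {c})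
--         take = gained + best(rest, budget - 1, [w - {c} for w in strip if w != {c}])
--         return max(skip, take)
--
--     return always + best(sorted(letters), k, strip)
-- ===== Notes on version B (the rewrite author's own statement) =====
-- stated objective: alternative
-- what changed: B replaces A's exhaustive enumeration of every k-combination of the teachable letters (rescanning every word per combination) by a branch-and-prune include/exclude recursion on the letter list: skipping a letter discards the words that contain it, learning a letter sheds it from every word and banks the words it completes, so the word list shrinks along every branch and no combinations or per-combination word scans exist.
import Mathlib
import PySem

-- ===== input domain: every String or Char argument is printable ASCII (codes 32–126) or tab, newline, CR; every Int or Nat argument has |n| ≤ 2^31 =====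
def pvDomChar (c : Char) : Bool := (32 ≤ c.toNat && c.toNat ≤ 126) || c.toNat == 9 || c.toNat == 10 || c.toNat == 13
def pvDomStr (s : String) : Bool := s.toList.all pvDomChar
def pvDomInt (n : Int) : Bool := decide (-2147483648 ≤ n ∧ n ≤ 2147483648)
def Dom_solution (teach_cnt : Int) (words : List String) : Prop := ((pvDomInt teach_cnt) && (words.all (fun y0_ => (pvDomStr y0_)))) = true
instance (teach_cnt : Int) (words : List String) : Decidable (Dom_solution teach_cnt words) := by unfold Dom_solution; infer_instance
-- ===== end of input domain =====

-- B replaces A's exhaustive scan of every k-combination of the teachable letters by a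
-- branch-and-prune include/exclude recursion on the letter list that shrinks the word
-- list at each step; no combinations are enumerated (objective: alternative).

-- ===== PORT A =====
def pyNecessary : PySem.Set Char := PySem.Set.ofList "antatica".toList

-- itertools.combinations over a list, in itertools order (A calls it)
def pyCombinations {α : Type} : List α → Nat → List (List α)
  | _, 0 => [[]]
  | [], _ + 1 => []
  | x :: xs, k + 1 =>
      (pyCombinations xs k).map (fun c => x :: c) ++ pyCombinations xs (k + 1)
  termination_by l _ => l.length

-- A's first loop body: state (always_valid, required_letters, word_strip)
def stepA (k : Int) (st : Int × PySem.Set Char × List (PySem.Set Char)) (word : String) :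
    Int × PySem.Set Char × List (PySem.Set Char) :=
  let filtered := PySem.Set.diff (PySem.Set.ofList word.toList) pyNecessary
  if filtered.isEmpty then (st.1 + 1, st.2.1, st.2.2)
  else if PySem.Set.len filtered ≤ k then
    (st.1, PySem.Set.update st.2.1 filtered, st.2.2 ++ [filtered])
  else st

-- A's inner for-c-in-word loop with break / for-else
def allInA (learned : PySem.Set Char) : List Char → Bool
  | [] => true
  | c :: cs => if !(PySem.Set.contains learned c) then false else allInA learned cs

def solution (teach_cnt : Int) (words : List String) : Int :=
  let k := teach_cnt - 5
  if k < 0 then 0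
  else
    let st := words.foldl (stepA k) (0, PySem.Set.empty, [])
    if PySem.Set.len st.2.1 ≤ k then st.1 + st.2.2.length
    else
      st.1 + (pyCombinations st.2.1 k.toNat).foldl (fun answer chosen =>
        let learned := PySem.Set.union (PySem.Set.ofList chosen) pyNecessary
        max answer (st.2.2.foldl
          (fun cnt w => if allInA learned w then cnt + 1 else cnt) (0 : Int))) 0

-- ===== PORT B =====
-- B's first loop body: state (always, strip, letters)
def stepB (k : Int) (st : Int × List (PySem.Set Char) × PySem.Set Char) (word : String) :
    Int × List (PySem.Set Char) × PySem.Set Char :=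
  let extra := PySem.Set.diff (PySem.Set.ofList word.toList) pyNecessary
  if extra.isEmpty then (st.1 + 1, st.2.1, st.2.2)
  else if PySem.Set.len extra ≤ k then
    (st.1, st.2.1 ++ [extra], PySem.Set.update st.2.2 extra)
  else st

-- B's recursive search: for the head letter c, either skip it (words containing c
-- become impossible) or learn it (words equal to {c} are done, others shed c)
def bestB : List Char → Int → List (PySem.Set Char) → Int
  | [], _, _ => 0
  | c :: rest, budget, strip =>
    if strip.isEmpty || budget == 0 then 0
    else
      let skip := bestB rest budget (strip.filter (fun w => !(PySem.Set.contains w c)))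
      let gained : Int := strip.countP (fun w => PySem.Set.equal w [c])
      let take := gained + bestB rest (budget - 1)
        ((strip.filter (fun w => !(PySem.Set.equal w [c]))).map (fun w => PySem.Set.diff w [c]))
      max skip take

def solution_alt (teach_cnt : Int) (words : List String) : Int :=
  let k := teach_cnt - 5
  if k < 0 then 0
  else
    let st := words.foldl (stepB k) (0, [], PySem.Set.empty)
    st.1 + bestB (PySem.List.sorted st.2.2 (fun c => c) false) k st.2.1

-- ===== PRECONDITION & SPEC =====
def Spec_solution (teach_cnt : Int) (words : List String) (out : Int) : Prop := out = solution_alt teach_cnt words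
instance (teach_cnt : Int) (words : List String) (out : Int) : Decidable (Spec_solution teach_cnt words out) := by unfold Spec_solution; infer_instance

-- ===== CLAIM =====
def Claim_equal_solution : Prop := ∀ (teach_cnt : Int) (words : List String), Dom_solution teach_cnt words → Spec_solution teach_cnt words (solution teach_cnt words)

-- ===== LEMMAS AND PROOFS =====

-- number of words of strip covered by the letter set S
def cntM (S : Finset Char) (strip : List (PySem.Set Char)) : Nat :=
  strip.countP (fun w => w.all (fun c => decide (c ∈ S)))

-- the optimum both programs compute: best coverage over subsets of L of size ≤ b
def MOpt (L : Finset Char) (b : Nat) (strip : List (PySem.Set Char)) : Nat :=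
  (L.powerset.filter (fun S => S.card ≤ b)).sup (fun S => cntM S strip)

-- words of strip are nonempty nodup sets
def GoodStrip (strip : List (PySem.Set Char)) : Prop :=
  ∀ w ∈ strip, w ≠ [] ∧ w.Nodup

theorem cntM_mono (S T : Finset Char) (h : S ⊆ T) (strip : List (PySem.Set Char)) :
    cntM S strip ≤ cntM T strip := by
  apply List.countP_mono_left
  intro w _ hw
  simp only [List.all_eq_true, decide_eq_true_eq] at hw ⊢
  exact fun c hc => h (hw c hc)

theorem cntM_empty (strip : List (PySem.Set Char)) (hg : GoodStrip strip) :
    cntM ∅ strip = 0 := by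
  apply List.countP_eq_zero.mpr
  intro w hw
  obtain ⟨hne, -⟩ := hg w hw
  cases w with
  | nil => exact absurd rfl hne
  | cons c cs => simp

theorem le_MOpt (L : Finset Char) (b : Nat) (strip : List (PySem.Set Char))
    (S : Finset Char) (hS : S ⊆ L) (hc : S.card ≤ b) : cntM S strip ≤ MOpt L b strip := by
  unfold MOpt
  exact Finset.le_sup (f := fun S => cntM S strip)
    (Finset.mem_filter.mpr ⟨Finset.mem_powerset.mpr hS, hc⟩)

theorem MOpt_le (L : Finset Char) (b : Nat) (strip : List (PySem.Set Char)) (m : Nat)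
    (h : ∀ S, S ⊆ L → S.card ≤ b → cntM S strip ≤ m) : MOpt L b strip ≤ m := by
  apply Finset.sup_le
  intro S hS
  simp only [Finset.mem_filter, Finset.mem_powerset] at hS
  exact h S hS.1 hS.2

-- counting split specific to the take/skip branches: countP p = countP q + countP (p ∧ ¬q)
theorem countP_split {α : Type} (l : List α) (p q : α → Bool)
    (h : ∀ x ∈ l, q x = true → p x = true) :
    l.countP p = l.countP q + l.countP (fun x => p x && !q x) := by
  induction l with
  | nil => simp
  | cons x xs ih =>
    have ihx := ih (fun y hy => h y (List.mem_cons_of_mem x hy))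
    by_cases hq : q x = true
    · simp [hq, h x List.mem_cons_self hq, ihx]; omega
    · simp only [Bool.not_eq_true] at hq
      by_cases hp : p x = true
      · simp [hq, hp, ihx]; omega
      · simp only [Bool.not_eq_true] at hp
        simp [hq, hp, ihx]

-- a nonempty nodup set equal (as a set) to {c} is the list [c]
theorem equal_singleton_iff (w : PySem.Set Char) (c : Char) (hne : w ≠ []) (hnd : w.Nodup) :
    PySem.Set.equal w [c] = true ↔ w = [c] := by
  rw [PySem.Set.equal_iff]
  constructor
  · intro h
    cases w with
    | nil => exact absurd rfl hne
    | cons d t =>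
      have hd : d = c := by simpa using (h d).mp (List.mem_cons_self)
      subst hd
      have ht : t = [] := by
        cases t with
        | nil => rfl
        | cons e t' =>
          have he : e = d := by simpa using (h e).mp (by simp)
          have : d ∈ e :: t' := he ▸ List.mem_cons_self
          simp at hnd; tauto
      rw [ht]
  · intro h; subst h; simp

-- skip branch: for c ∉ S, words containing c never count
theorem cntM_skip (S : Finset Char) (c : Char) (hc : c ∉ S) (strip : List (PySem.Set Char)) :
    cntM S strip = cntM S (strip.filter (fun w => !(PySem.Set.contains w c))) := by
  unfold cntM
  rw [List.countP_filter]
  apply List.countP_congr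
  intro w _
  simp only [List.all_eq_true, decide_eq_true_eq, Bool.and_eq_true, Bool.not_eq_true',
    PySem.Set.contains_eq_listContains]
  constructor
  · intro h
    refine ⟨h, ?_⟩
    by_cases hcw : c ∈ w
    · exact absurd (h c hcw) hc
    · simpa using hcw
  · exact fun h => h.1

-- take branch: counting under insert c S = (#words = {c}) + counting of the shed words
theorem cntM_take (S : Finset Char) (c : Char) (strip : List (PySem.Set Char))
    (hg : GoodStrip strip) :
    cntM (insert c S) strip
      = strip.countP (fun w => PySem.Set.equal w [c])
        + cntM S ((strip.filter (fun w => !(PySem.Set.equal w [c]))).map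
            (fun w => PySem.Set.diff w [c])) := by
  unfold cntM
  rw [List.countP_map, List.countP_filter]
  rw [countP_split strip (fun w => w.all (fun d => decide (d ∈ insert c S)))
    (fun w => PySem.Set.equal w [c]) ?imp]
  case imp =>
    intro w hw heq
    obtain ⟨hne, hnd⟩ := hg w hw
    rw [equal_singleton_iff w c hne hnd] at heq
    subst heq
    simp
  congr 1
  apply List.countP_congr
  intro w hw
  obtain ⟨hne, hnd⟩ := hg w hw
  simp only [Function.comp_apply, List.all_eq_true, decide_eq_true_eq, Bool.and_eq_true,
    Bool.not_eq_true']
  constructor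
  · rintro ⟨hall, hneq⟩
    refine ⟨?_, hneq⟩
    intro d hd
    rw [PySem.Set.mem_diff] at hd
    have := hall d hd.1
    rcases Finset.mem_insert.mp this with h | h
    · exact absurd (by simp [h]) hd.2
    · exact h
  · rintro ⟨hall, hneq⟩
    refine ⟨?_, hneq⟩
    intro d hd
    by_cases hdc : d = c
    · simp [hdc]
    · exact Finset.mem_insert_of_mem (hall d ((PySem.Set.mem_diff _ _ _).mpr ⟨hd, by simp [hdc]⟩))

-- index-set decomposition for MOpt over insert
theorem powerset_insert_filter (c : Char) (L : Finset Char) (b : Nat) (hb : 1 ≤ b) :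
    ((insert c L).powerset.filter (fun S => S.card ≤ b))
      = (L.powerset.filter (fun S => S.card ≤ b))
        ∪ ((L.powerset.filter (fun S => S.card ≤ b - 1)).image (insert c)) := by
  ext S
  simp only [Finset.mem_filter, Finset.mem_powerset, Finset.mem_union, Finset.mem_image]
  constructor
  · rintro ⟨hsub, hcard⟩
    by_cases hcS : c ∈ S
    · right
      refine ⟨S.erase c, ⟨?_, ?_⟩, Finset.insert_erase hcS⟩
      · intro x hx
        have hxS := Finset.mem_of_mem_erase hx
        have hxc := Finset.ne_of_mem_erase hx
        rcases Finset.mem_insert.mp (hsub hxS) with h | h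
        · exact absurd h hxc
        · exact h
      · have := Finset.card_erase_of_mem hcS
        omega
    · left
      refine ⟨?_, hcard⟩
      intro x hx
      rcases Finset.mem_insert.mp (hsub hx) with h | h
      · exact absurd (h ▸ hx) hcS
      · exact h
  · rintro (⟨hsub, hcard⟩ | ⟨T, ⟨hsub, hcard⟩, rfl⟩)
    · exact ⟨hsub.trans (Finset.subset_insert c L), hcard⟩
    · refine ⟨Finset.insert_subset_insert c hsub, ?_⟩
      have := Finset.card_insert_le c T
      omega

theorem MOpt_insert (c : Char) (L : Finset Char) (hc : c ∉ L) (b : Nat) (hb : 1 ≤ b)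
    (strip : List (PySem.Set Char)) (hg : GoodStrip strip) :
    MOpt (insert c L) b strip
      = max (MOpt L b (strip.filter (fun w => !(PySem.Set.contains w c))))
          (strip.countP (fun w => PySem.Set.equal w [c])
            + MOpt L (b - 1) ((strip.filter (fun w => !(PySem.Set.equal w [c]))).map
                (fun w => PySem.Set.diff w [c]))) := by
  unfold MOpt
  rw [powerset_insert_filter c L b hb, Finset.sup_union, Finset.sup_image]
  have hleft : (L.powerset.filter (fun S => S.card ≤ b)).sup (fun S => cntM S strip)
      = (L.powerset.filter (fun S => S.card ≤ b)).sup
          (fun S => cntM S (strip.filter (fun w => !(PySem.Set.contains w c)))) := by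
    apply Finset.sup_congr rfl
    intro S hS
    simp only [Finset.mem_filter, Finset.mem_powerset] at hS
    exact cntM_skip S c (fun h => hc (hS.1 h)) strip
  have hright : (L.powerset.filter (fun S => S.card ≤ b - 1)).sup ((fun S => cntM S strip) ∘ insert c)
      = strip.countP (fun w => PySem.Set.equal w [c])
        + (L.powerset.filter (fun S => S.card ≤ b - 1)).sup
            (fun S => cntM S ((strip.filter (fun w => !(PySem.Set.equal w [c]))).map
              (fun w => PySem.Set.diff w [c]))) := by
    have hne : (L.powerset.filter (fun S => S.card ≤ b - 1)).Nonempty :=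
      ⟨∅, by simp⟩
    have h1 : (L.powerset.filter (fun S => S.card ≤ b - 1)).sup ((fun S => cntM S strip) ∘ insert c)
        = (L.powerset.filter (fun S => S.card ≤ b - 1)).sup
            (fun S => strip.countP (fun w => PySem.Set.equal w [c])
              + cntM S ((strip.filter (fun w => !(PySem.Set.equal w [c]))).map
                  (fun w => PySem.Set.diff w [c]))) := by
      apply Finset.sup_congr rfl
      intro S hS
      exact cntM_take S c strip hg
    rw [h1, ← Finset.add_sup hne]
  rw [hleft, hright]

theorem goodStrip_skip (strip : List (PySem.Set Char)) (c : Char) (hg : GoodStrip strip) :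
    GoodStrip (strip.filter (fun w => !(PySem.Set.contains w c))) := by
  intro w hw
  exact hg w (List.mem_of_mem_filter hw)

theorem goodStrip_take (strip : List (PySem.Set Char)) (c : Char) (hg : GoodStrip strip) :
    GoodStrip ((strip.filter (fun w => !(PySem.Set.equal w [c]))).map
      (fun w => PySem.Set.diff w [c])) := by
  intro w' hw'
  obtain ⟨w, hw, rfl⟩ := List.mem_map.mp hw'
  have hwf := List.mem_filter.mp hw
  obtain ⟨hne, hnd⟩ := hg w hwf.1
  refine ⟨?_, PySem.Set.nodup_diff _ _ hnd⟩
  intro hdiff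
  have heq : w = [c] := by
    cases w with
    | nil => exact absurd rfl hne
    | cons d t =>
      have hd : d = c := by
        by_contra hdc
        have : d ∈ PySem.Set.diff (d :: t) [c] :=
          (PySem.Set.mem_diff _ _ _).mpr ⟨List.mem_cons_self, by simp [hdc]⟩
        rw [hdiff] at this; cases this
      have ht : t = [] := by
        by_contra htne
        obtain ⟨e, he⟩ := List.exists_mem_of_ne_nil t htne
        have hed : e ≠ d := fun h => (List.nodup_cons.mp hnd).1 (h ▸ he)
        have : e ∈ PySem.Set.diff (d :: t) [c] :=
          (PySem.Set.mem_diff _ _ _).mpr ⟨List.mem_cons_of_mem d he, by simp [hd ▸ hed]⟩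
        rw [hdiff] at this; cases this
      rw [ht, hd]
  have hq := hwf.2
  rw [heq] at hq
  have htrue : PySem.Set.equal ([c] : PySem.Set Char) [c] = true :=
    (PySem.Set.equal_iff _ _).mpr (fun x => Iff.rfl)
  rw [htrue] at hq; cases hq

theorem MOpt_zero_strip (L : Finset Char) (b : Nat) : MOpt L b [] = 0 := by
  apply Nat.le_antisymm _ (Nat.zero_le _)
  exact MOpt_le L b [] 0 (fun S _ _ => by simp [cntM])

theorem MOpt_zero_budget (L : Finset Char) (strip : List (PySem.Set Char)) (hg : GoodStrip strip) :
    MOpt L 0 strip = 0 := by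
  apply Nat.le_antisymm _ (Nat.zero_le _)
  apply MOpt_le
  intro S _ hc
  have : S = ∅ := Finset.card_eq_zero.mp (Nat.le_zero.mp hc)
  rw [this, cntM_empty strip hg]

-- B's recursion computes the optimum
theorem bestB_eq (letters : List Char) : ∀ (budget : Int) (strip : List (PySem.Set Char)),
    0 ≤ budget → letters.Nodup → GoodStrip strip →
    bestB letters budget strip = (MOpt letters.toFinset budget.toNat strip : Int) := by
  induction letters with
  | nil =>
    intro budget strip _ _ hg
    show (0 : Int) = _
    rw [List.toFinset_nil]
    have : MOpt ∅ budget.toNat strip = cntM ∅ strip := by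
      unfold MOpt
      have : (Finset.filter (fun S => S.card ≤ budget.toNat) (∅ : Finset Char).powerset)
          = {∅} := by
        ext S; simp [Finset.mem_filter]
        intro h; subst h; simp
      rw [this, Finset.sup_singleton]
    rw [this, cntM_empty strip hg]
    simp
  | cons c rest ih =>
    intro budget strip hb hnd hg
    rw [List.nodup_cons] at hnd
    show (if strip.isEmpty || budget == 0 then 0 else _) = _
    by_cases hs : strip = []
    · subst hs
      simp [MOpt_zero_strip]
    · by_cases hbz : budget = 0
      · subst hbz
        simp [MOpt_zero_budget _ strip hg]
      · have hpos : (1 : Int) ≤ budget := by omega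
        have hcond : (strip.isEmpty || budget == 0) = false := by
          simp [hs, hbz]
        rw [hcond]
        simp only [Bool.false_eq_true, if_false]
        have hskip := ih budget (strip.filter (fun w => !(PySem.Set.contains w c))) hb hnd.2
          (goodStrip_skip strip c hg)
        have htake := ih (budget - 1)
          ((strip.filter (fun w => !(PySem.Set.equal w [c]))).map (fun w => PySem.Set.diff w [c]))
          (by omega) hnd.2 (goodStrip_take strip c hg)
        rw [hskip, htake]
        rw [List.toFinset_cons]
        have hcL : c ∉ rest.toFinset := by simpa using hnd.1
        have hb1 : 1 ≤ budget.toNat := by omega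
        rw [MOpt_insert c rest.toFinset hcL budget.toNat hb1 strip hg]
        have htn : (budget - 1).toNat = budget.toNat - 1 := by omega
        rw [htn]
        push_cast [Nat.cast_max]
        ring_nf

-- ===== A-side characterisation =====

theorem allInA_iff (s : PySem.Set Char) (w : List Char) :
    allInA s w = true ↔ ∀ c ∈ w, c ∈ s := by
  induction w with
  | nil => simp [allInA]
  | cons c cs ih => simp [allInA, ih]

theorem pyCombinations_sublist {α : Type} :
    ∀ (l : List α) (n : Nat) (cs : List α), cs ∈ pyCombinations l n → cs.Sublist l := by
  intro l
  induction l with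
  | nil =>
    intro n cs h
    cases n with
    | zero => simp [pyCombinations] at h; subst h; exact List.Sublist.refl _
    | succ n => simp [pyCombinations] at h
  | cons x xs ih =>
    intro n cs h
    cases n with
    | zero => simp [pyCombinations] at h; subst h; exact List.nil_sublist _
    | succ n =>
      simp only [pyCombinations, List.mem_append, List.mem_map] at h
      rcases h with ⟨c', hc', rfl⟩ | h
      · exact List.Sublist.cons₂ x (ih n c' hc')
      · exact List.Sublist.cons x (ih (n + 1) cs h)

theorem pyCombinations_length {α : Type} :
    ∀ (l : List α) (n : Nat) (cs : List α), cs ∈ pyCombinations l n → cs.length = n := by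
  intro l
  induction l with
  | nil =>
    intro n cs h
    cases n with
    | zero => simp [pyCombinations] at h; subst h; rfl
    | succ n => simp [pyCombinations] at h
  | cons x xs ih =>
    intro n cs h
    cases n with
    | zero => simp [pyCombinations] at h; subst h; rfl
    | succ n =>
      simp only [pyCombinations, List.mem_append, List.mem_map] at h
      rcases h with ⟨c', hc', rfl⟩ | h
      · simp [ih n c' hc']
      · exact ih (n + 1) cs h

theorem pyCombinations_complete (l : List Char) (hl : l.Nodup) :
    ∀ (n : Nat) (T : Finset Char), T ⊆ l.toFinset → T.card = n →
      ∃ cs ∈ pyCombinations l n, cs.toFinset = T := by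
  induction l with
  | nil =>
    intro n T hsub hcard
    have : T = ∅ := Finset.subset_empty.mp (by simpa using hsub)
    subst this
    simp at hcard
    subst hcard
    exact ⟨[], by simp [pyCombinations]⟩
  | cons x xs ih =>
    rw [List.nodup_cons] at hl
    intro n T hsub hcard
    by_cases hx : x ∈ T
    · have hT' : T.erase x ⊆ xs.toFinset := by
        intro y hy
        have hyT := Finset.mem_of_mem_erase hy
        have hyx := Finset.ne_of_mem_erase hy
        have := hsub hyT
        simp only [List.toFinset_cons, Finset.mem_insert] at this
        rcases this with h | h
        · exact absurd h hyx
        · exact h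
      have hcard' : (T.erase x).card = n - 1 := by
        rw [Finset.card_erase_of_mem hx, hcard]
      have hn : 1 ≤ n := by
        rw [← hcard]
        exact Finset.card_pos.mpr ⟨x, hx⟩ |>.le.trans (le_refl _) |> fun _ => Finset.card_pos.mpr ⟨x, hx⟩
      obtain ⟨cs, hcs, hcsT⟩ := ih hl.2 (n - 1) (T.erase x) hT' hcard'
      obtain ⟨m, rfl⟩ : ∃ m, n = m + 1 := ⟨n - 1, by omega⟩
      refine ⟨x :: cs, ?_, ?_⟩
      · simp only [pyCombinations, List.mem_append, List.mem_map]
        exact Or.inl ⟨cs, by simpa using hcs, rfl⟩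
      · simp only [List.toFinset_cons]
        rw [hcsT, Finset.insert_erase hx]
    · have hT' : T ⊆ xs.toFinset := by
        intro y hy
        have := hsub hy
        simp only [List.toFinset_cons, Finset.mem_insert] at this
        rcases this with h | h
        · exact absurd (h ▸ hy) hx
        · exact h
      obtain ⟨cs, hcs, hcsT⟩ := ih hl.2 n T hT' hcard
      cases n with
      | zero =>
        have : T = ∅ := Finset.card_eq_zero.mp hcard
        subst this
        exact ⟨[], by simp [pyCombinations]⟩
      | succ m =>
        refine ⟨cs, ?_, hcsT⟩
        simp only [pyCombinations, List.mem_append]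
        exact Or.inr hcs

-- A's inner count equals cntM of the combination's letter set
theorem countA_eq (combo : List Char) (strip : List (PySem.Set Char))
    (hn : ∀ w ∈ strip, ∀ c ∈ w, c ∉ pyNecessary) :
    strip.foldl (fun cnt w =>
        if allInA (PySem.Set.union (PySem.Set.ofList combo) pyNecessary) w then cnt + 1 else cnt)
      (0 : Int) = (cntM combo.toFinset strip : Int) := by
  rw [PySem.List.foldl_count_if]
  unfold cntM
  rw [List.countP_congr (p := fun w => allInA (PySem.Set.union (PySem.Set.ofList combo) pyNecessary) w)
      (q := fun w => w.all (fun c => decide (c ∈ combo.toFinset))) ?h]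
  · simp
  case h =>
    intro w hw
    rw [allInA_iff]
    simp only [List.all_eq_true, decide_eq_true_eq, List.mem_toFinset]
    constructor
    · intro h c hc
      have := h c hc
      rw [PySem.Set.mem_union] at this
      rcases this with h' | h'
      · rwa [PySem.Set.mem_ofList] at h'
      · exact absurd h' (hn w hw c hc)
    · intro h c hc
      rw [PySem.Set.mem_union, PySem.Set.mem_ofList]
      exact Or.inl (h c hc)

theorem foldl_max_le {α : Type} (l : List α) (f : α → Int) (m : Int) :
    ∀ i, i ≤ m → (∀ x ∈ l, f x ≤ m) → l.foldl (fun a x => max a (f x)) i ≤ m := by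
  induction l with
  | nil => intro i hi _; exact hi
  | cons x xs ih =>
    intro i hi h
    exact ih _ (max_le hi (h x List.mem_cons_self)) (fun y hy => h y (List.mem_cons_of_mem x hy))

theorem le_foldl_max' {α : Type} (l : List α) (f : α → Int) :
    ∀ i, i ≤ l.foldl (fun a x => max a (f x)) i ∧
      ∀ x ∈ l, f x ≤ l.foldl (fun a x => max a (f x)) i := by
  induction l with
  | nil => intro i; exact ⟨le_refl _, by simp⟩
  | cons x xs ih =>
    intro i
    obtain ⟨h1, h2⟩ := ih (max i (f x))
    refine ⟨le_trans (le_max_left _ _) h1, ?_⟩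
    intro y hy
    rcases List.mem_cons.mp hy with rfl | hy
    · exact le_trans (le_max_right _ _) h1
    · exact h2 y hy

-- phase-1 invariant for A's fold
def InvA (st : Int × PySem.Set Char × List (PySem.Set Char)) : Prop :=
  st.2.1.Nodup ∧ ∀ w ∈ st.2.2, w ≠ [] ∧ w.Nodup ∧ ∀ c ∈ w, c ∈ st.2.1 ∧ c ∉ pyNecessary

theorem invA_step (k : Int) (st : Int × PySem.Set Char × List (PySem.Set Char)) (word : String)
    (h : InvA st) : InvA (stepA k st word) := by
  obtain ⟨hnd, hws⟩ := h
  unfold stepA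
  dsimp only
  set f := PySem.Set.diff (PySem.Set.ofList word.toList) pyNecessary with hf
  by_cases he : f.isEmpty
  · rw [if_pos he]; exact ⟨hnd, hws⟩
  · rw [if_neg he]
    by_cases hlen : PySem.Set.len f ≤ k
    · rw [if_pos hlen]
      refine ⟨PySem.Set.nodup_update _ _ hnd, ?_⟩
      intro w hw
      rcases List.mem_append.mp hw with hw | hw
      · obtain ⟨h1, h2, h3⟩ := hws w hw
        exact ⟨h1, h2, fun c hc => ⟨(PySem.Set.mem_update _ _ _).mpr (Or.inl (h3 c hc).1),
          (h3 c hc).2⟩⟩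
      · simp only [List.mem_singleton] at hw; subst hw
        refine ⟨by simpa [List.isEmpty_iff] using he,
          PySem.Set.nodup_diff _ _ (PySem.Set.nodup_ofList _), ?_⟩
        intro c hc
        exact ⟨(PySem.Set.mem_update _ _ _).mpr (Or.inr hc),
          ((PySem.Set.mem_diff _ _ _).mp hc).2⟩
    · rw [if_neg hlen]; exact ⟨hnd, hws⟩

theorem invA_fold (k : Int) (words : List String) :
    ∀ st, InvA st → InvA (words.foldl (stepA k) st) := by
  induction words with
  | nil => intro st h; exact h
  | cons w ws ih => intro st h; exact ih _ (invA_step k st w h)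

-- B's phase-1 state is A's with the components swapped
theorem foldB_eq_foldA (k : Int) (words : List String) :
    ∀ (st : Int × PySem.Set Char × List (PySem.Set Char)),
      words.foldl (stepB k) (st.1, st.2.2, st.2.1)
        = ((words.foldl (stepA k) st).1, (words.foldl (stepA k) st).2.2,
           (words.foldl (stepA k) st).2.1) := by
  induction words with
  | nil => intro st; rfl
  | cons w ws ih =>
    intro st
    have hstep : stepB k (st.1, st.2.2, st.2.1) w
        = ((stepA k st w).1, (stepA k st w).2.2, (stepA k st w).2.1) := by
      unfold stepA stepB
      dsimp only
      split_ifs <;> rfl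
    rw [List.foldl_cons, List.foldl_cons, hstep, ih (stepA k st w)]

-- A's combination fold equals the optimum
theorem foldA_eq_MOpt (req : List Char) (strip : List (PySem.Set Char)) (n : Nat)
    (hreq : req.Nodup) (hn : n ≤ req.length)
    (hnec : ∀ w ∈ strip, ∀ c ∈ w, c ∉ pyNecessary) :
    (pyCombinations req n).foldl (fun answer chosen =>
        max answer (strip.foldl (fun cnt w =>
          if allInA (PySem.Set.union (PySem.Set.ofList chosen) pyNecessary) w then cnt + 1 else cnt)
          (0 : Int))) 0
      = (MOpt req.toFinset n strip : Int) := by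
  set f : List Char → Int := fun chosen => strip.foldl (fun cnt w =>
    if allInA (PySem.Set.union (PySem.Set.ofList chosen) pyNecessary) w then cnt + 1 else cnt)
    (0 : Int) with hfdef
  have hfval : ∀ chosen, f chosen = (cntM chosen.toFinset strip : Int) :=
    fun chosen => countA_eq chosen strip hnec
  apply le_antisymm
  · apply foldl_max_le
    · exact_mod_cast Nat.zero_le _
    · intro cs hcs
      show f cs ≤ (MOpt req.toFinset n strip : Int)
      rw [hfval cs]
      have hsub : cs.toFinset ⊆ req.toFinset := by
        intro x hx
        rw [List.mem_toFinset] at hx ⊢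
        exact (pyCombinations_sublist req n cs hcs).subset hx
      have hcard : cs.toFinset.card ≤ n := by
        rw [List.toFinset_card_of_nodup
          ((pyCombinations_sublist req n cs hcs).nodup hreq)]
        exact le_of_eq (pyCombinations_length req n cs hcs)
      exact_mod_cast le_MOpt req.toFinset n strip cs.toFinset hsub hcard
  · have hboundall : ∀ S, S ⊆ req.toFinset → S.card ≤ n →
        (cntM S strip : Int) ≤ (pyCombinations req n).foldl (fun a x => max a (f x)) 0 := by
      intro S hS hcard
      have hcardreq : req.toFinset.card = req.length := List.toFinset_card_of_nodup hreq
      obtain ⟨T, hST, hTreq, hTcard⟩ :=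
        Finset.exists_subsuperset_card_eq hS hcard (by omega)
      obtain ⟨cs, hcs, hcsT⟩ := pyCombinations_complete req hreq n T hTreq hTcard
      have h1 : cntM S strip ≤ cntM T strip := cntM_mono S T hST strip
      have h2 : (cntM T strip : Int) ≤ (pyCombinations req n).foldl (fun a x => max a (f x)) 0 := by
        rw [← hcsT, ← hfval cs]
        exact (le_foldl_max' (pyCombinations req n) f 0).2 cs hcs
      calc (cntM S strip : Int) ≤ (cntM T strip : Int) := by exact_mod_cast h1
        _ ≤ _ := h2
    unfold MOpt
    obtain ⟨S₀, hS₀mem, hS₀⟩ := Finset.exists_mem_eq_sup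
      (req.toFinset.powerset.filter (fun S => S.card ≤ n)) ⟨∅, by simp⟩
      (fun S => cntM S strip)
    rw [hS₀]
    simp only [Finset.mem_filter, Finset.mem_powerset] at hS₀mem
    exact hboundall S₀ hS₀mem.1 hS₀mem.2

-- ===== VERDICT =====
theorem solution_spec : Claim_equal_solution := by
  intro teach_cnt words _
  unfold Spec_solution solution solution_alt
  by_cases hk : teach_cnt - 5 < 0
  · simp [hk]
  · simp only [hk, if_false]
    have hk0 : 0 ≤ teach_cnt - 5 := by omega
    set k := teach_cnt - 5 with hkdef
    set sa := words.foldl (stepA k) (0, PySem.Set.empty, []) with hsa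
    have hfold := foldB_eq_foldA k words (0, PySem.Set.empty, [])
    have hinit : InvA (0, PySem.Set.empty, []) := ⟨List.nodup_nil, by simp⟩
    have hinv : InvA sa := invA_fold k words _ hinit
    obtain ⟨hreqnd, hws⟩ := hinv
    have hg : GoodStrip sa.2.2 := fun w hw => ⟨(hws w hw).1, (hws w hw).2.1⟩
    have hnec : ∀ w ∈ sa.2.2, ∀ c ∈ w, c ∉ pyNecessary :=
      fun w hw c hc => ((hws w hw).2.2 c hc).2
    have hsubreq : ∀ w ∈ sa.2.2, ∀ c ∈ w, c ∈ sa.2.1 :=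
      fun w hw c hc => ((hws w hw).2.2 c hc).1
    rw [show words.foldl (stepB k) (0, [], PySem.Set.empty)
        = (sa.1, sa.2.2, sa.2.1) from hfold]
    have hsortnd : (PySem.List.sorted sa.2.1 (fun c => c) false).Nodup :=
      (PySem.List.sorted_perm sa.2.1 (fun c => c) false).nodup_iff.mpr hreqnd
    have hsortfin : (PySem.List.sorted sa.2.1 (fun c => c) false).toFinset = sa.2.1.toFinset :=
      List.toFinset_eq_of_perm _ _ (PySem.List.sorted_perm sa.2.1 (fun c => c) false)
    rw [bestB_eq _ k sa.2.2 hk0 hsortnd hg, hsortfin]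
    by_cases hlen : PySem.Set.len sa.2.1 ≤ k
    · rw [if_pos hlen]
      have hMfull : MOpt sa.2.1.toFinset k.toNat sa.2.2 = sa.2.2.length := by
        apply Nat.le_antisymm
        · exact MOpt_le _ _ _ _ (fun S _ _ => List.countP_le_length)
        · have hcard : sa.2.1.toFinset.card ≤ k.toNat := by
            rw [List.toFinset_card_of_nodup hreqnd]
            have : (sa.2.1.length : Int) ≤ k := by
              simpa [PySem.Set.len, PySem.List.len] using hlen
            omega
          have hfull : cntM sa.2.1.toFinset sa.2.2 = sa.2.2.length := by
            apply List.countP_eq_length.mpr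
            intro w hw
            simp only [List.all_eq_true, decide_eq_true_eq, List.mem_toFinset]
            exact fun c hc => hsubreq w hw c hc
          rw [← hfull]
          exact le_MOpt _ _ _ _ (Finset.Subset.refl _) hcard
      rw [hMfull]
    · rw [if_neg hlen]
      congr 1
      have hnlen : k.toNat ≤ sa.2.1.length := by
        have : ¬ ((sa.2.1.length : Int) ≤ k) := by
          simpa [PySem.Set.len, PySem.List.len] using hlen
        omega
      exact foldA_eq_MOpt sa.2.1 sa.2.2 k.toNat hreqnd hnlen hnec
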